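-- pv_equiv track=rewrite | github.com/Nanazuzu/PythonLearn | 2025_06_15/2025_06_15(2).py | lru_words
-- ===== SOURCE A (Python) =====
-- def lru_words(capacity: int, words: list[str]) -> list[str]:
--   ret = []
--   for index in words:
--     if index in ret:
--       i = ret.index(index)
--       ret.pop(i)
--       ret.insert(0, index)
--     else:
--       ret.insert(0, index)
--     if capacity < len(ret):
--       ret.pop()
--   return ret
-- ===== SOURCE B (Python) =====
-- def lru_words(capacity: int, words: list[str]) -> list[str]:
--     seen = set()
--     out = []
--     for w in reversed(words):
--         if capacity <= len(out):
--             break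
--         if w not in seen:
--             seen.add(w)
--             out.append(w)
--     return out
-- ===== Notes on version B (the rewrite author's own statement) =====
-- stated objective: faster
-- what changed: A simulates the LRU cache forward with a move-to-front list (membership scan, index, pop, insert per word); B makes one reverse pass collecting first occurrences into a seen-set and stops once capacity items are gathered.
import Mathlib
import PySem

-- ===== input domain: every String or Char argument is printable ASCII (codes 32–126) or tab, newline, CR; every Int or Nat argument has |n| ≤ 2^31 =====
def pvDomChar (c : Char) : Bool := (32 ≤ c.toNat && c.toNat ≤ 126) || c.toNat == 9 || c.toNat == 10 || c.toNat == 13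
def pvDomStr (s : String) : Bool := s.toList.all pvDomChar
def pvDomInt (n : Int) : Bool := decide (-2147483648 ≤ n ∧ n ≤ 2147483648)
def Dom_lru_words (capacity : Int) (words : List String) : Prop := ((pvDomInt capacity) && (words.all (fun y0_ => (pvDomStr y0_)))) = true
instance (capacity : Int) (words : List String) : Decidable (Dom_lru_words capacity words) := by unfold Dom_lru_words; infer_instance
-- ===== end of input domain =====

-- B replaces A's move-to-front list with eviction by a single reverse pass collecting
-- first occurrences up to capacity (objective: faster, one pass, no inner list scans).


-- ===== PORT A =====
-- one iteration of A's for-loop body over the state `ret`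
def lruWordsStep (capacity : Int) (ret : List String) (index : String) : List String :=
  let ret :=
    if index ∈ ret then
      match PySem.List.index? ret index with
      | some i =>
        match PySem.List.pop? ret (i : Int) with
        | some (_, r) => PySem.List.insert r 0 index
        | none => ret    -- unreachable: i is a valid index
      | none => ret      -- unreachable: index ∈ ret
    else PySem.List.insert ret 0 index
  if capacity < (ret.length : Int) then
    match PySem.List.pop? ret (-1) with   -- ret.pop()
    | some (_, r) => r
    | none => ret      -- unreachable: ret is nonempty here
  else ret

def lru_words (capacity : Int) (words : List String) : List String :=
  words.foldl (lruWordsStep capacity) []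

-- ===== PORT B =====
-- B's loop over reversed(words) with `seen` set and `out` accumulator
def lruRev (capacity : Int) : List String → PySem.Set String → List String → List String
  | [], _, out => out
  | w :: rest, seen, out =>
    if capacity ≤ (out.length : Int) then out
    else if PySem.Set.contains seen w then lruRev capacity rest seen out
    else lruRev capacity rest (PySem.Set.add seen w) (out ++ [w])

def lru_words_alt (capacity : Int) (words : List String) : List String :=
  lruRev capacity words.reverse PySem.Set.empty []

-- ===== PRECONDITION & SPEC =====
def Spec_lru_words (capacity : Int) (words : List String) (out : List String) : Prop := out = lru_words_alt capacity words
instance (capacity : Int) (words : List String) (out : List String) : Decidable (Spec_lru_words capacity words out) := by unfold Spec_lru_words; infer_instance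

-- ===== CLAIM (what is proved, stated in full; the proofs are below) =====
def Claim_equal_lru_words : Prop := ∀ (capacity : Int) (words : List String), Dom_lru_words capacity words → Spec_lru_words capacity words (lru_words capacity words)

-- ===== LEMMAS AND PROOFS =====

-- first occurrences of a list, in order (the common characterisation both ports are reduced to)
def fo : List String → List String
  | [] => []
  | w :: r => w :: (fo r).erase w

theorem fo_filter (w : String) (l : List String) :
    fo (l.filter (fun x => x != w)) = (fo l).erase w := by
  induction l with
  | nil => simp [fo]
  | cons x r ih =>
    by_cases hx : x = w
    · subst hx
      simp [fo, ih, List.erase_cons_head]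
    · have hbx : (x != w) = true := by simp [hx]
      simp only [List.filter_cons, hbx, if_pos, fo, ih]
      rw [List.erase_cons_tail (by simp [hx]), List.erase_comm]

theorem take_append_sub (p : List String) : ∀ (q : List String) (n : Nat),
    (p ++ q).take n = p.take n ++ q.take (n - p.length) := by
  induction p with
  | nil => intro q n; simp
  | cons x p ih =>
    intro q n
    cases n with
    | zero => simp
    | succ k => simp [List.take_succ_cons, ih q k, Nat.succ_sub_succ]

theorem eraseIdx_len (pre suf : List String) (w : String) :
    (pre ++ w :: suf).eraseIdx pre.length = pre ++ suf := by
  induction pre with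
  | nil => simp
  | cons x p ih => simp [List.eraseIdx_cons_succ, ih]

-- `ret.pop()` on a nonempty list drops the last element
theorem pop_neg_one (l : List String) (h : l ≠ []) :
    PySem.List.pop? l (-1) = some (l.getLast h, l.dropLast) := by
  conv_lhs => rw [← List.dropLast_append_getLast h]
  rw [PySem.List.pop?_last]

-- A's loop body equals: cons-after-erase, then truncate to capacity
theorem step_eq (c : Int) (ret : List String) (w : String) :
    lruWordsStep c ret w =
      if c < ((w :: ret.erase w).length : Int)
      then (w :: ret.erase w).dropLast else (w :: ret.erase w) := by
  by_cases hw : w ∈ ret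
  · obtain ⟨i, hi⟩ := Option.isSome_iff_exists.mp ((PySem.List.index?_isSome_iff ret w).mpr hw)
    obtain ⟨pre, suf, hsplit, hk, hp⟩ := (PySem.List.index?_eq_some_iff ret w i).mp hi
    subst hk
    have hlt : pre.length < ret.length := by
      subst hsplit; simp only [List.length_append, List.length_cons]; omega
    have he : ret.eraseIdx pre.length = ret.erase w := by
      subst hsplit
      rw [eraseIdx_len, List.erase_append_right _ hp, List.erase_cons_head]
    unfold lruWordsStep
    simp only [if_pos hw, hi, PySem.List.pop?_natCast ret pre.length hlt, he,
      PySem.List.insert_zero]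
    by_cases hc : c < ((w :: ret.erase w).length : Int)
    · rw [if_pos hc, if_pos hc, pop_neg_one (w :: ret.erase w) (by simp)]
    · rw [if_neg hc, if_neg hc]
  · unfold lruWordsStep
    rw [List.erase_of_not_mem hw]
    simp only [if_neg hw, PySem.List.insert_zero]
    by_cases hc : c < ((w :: ret).length : Int)
    · rw [if_pos hc, if_pos hc, pop_neg_one (w :: ret) (by simp)]
    · rw [if_neg hc, if_neg hc]

-- erasing an element that sits inside the taken prefix of a duplicate-free list
theorem take_erase_mem (m : List String) (w : String) (n : Nat) (hw : w ∈ m.take n) : (m.take n).erase w = (m.erase w).take (n - 1) := by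
  have hwm : w ∈ m := List.take_subset n m hw
  obtain ⟨p, s, hp, hsplit, herase⟩ := List.exists_erase_eq hwm
  have hplt : p.length < n := by
    by_contra h
    push_neg at h
    rw [hsplit, List.take_append_of_le_length h] at hw
    exact hp (List.take_subset _ _ hw)
  rw [herase, hsplit, take_append_sub p (w :: s) n,
    List.take_of_length_le (le_of_lt hplt)]
  rw [show n - p.length = (n - p.length - 1) + 1 from by omega, List.take_succ_cons]
  rw [List.erase_append_right _ hp, List.erase_cons_head]
  rw [take_append_sub p s (n - 1),
    List.take_of_length_le (show p.length ≤ n - 1 from by omega)]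
  rw [show n - p.length - 1 = n - 1 - p.length from by omega]

-- erasing an element outside the taken prefix does not change a shorter take
theorem take_erase_not_mem (m : List String) (w : String) (n k : Nat)
    (hw : w ∉ m.take n) (hk : k < n) : (m.erase w).take k = m.take k := by
  by_cases hwm : w ∈ m
  · obtain ⟨p, s, hp, hsplit, herase⟩ := List.exists_erase_eq hwm
    have hpge : n ≤ p.length := by
      by_contra h
      push_neg at h
      apply hw
      rw [hsplit, take_append_sub, List.take_of_length_le (le_of_lt h)]
      rw [show n - p.length = (n - p.length - 1) + 1 from by omega, List.take_succ_cons]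
      simp
    rw [herase, hsplit, List.take_append_of_le_length (by omega),
      List.take_append_of_le_length (by omega)]
  · rw [List.erase_of_not_mem hwm]

-- the truncation step preserves the take-of-fo invariant
theorem step_take (c : Int) (m : List String) (w : String) :
    lruWordsStep c (m.take c.toNat) w = (w :: m.erase w).take c.toNat := by
  rw [step_eq]
  by_cases hneg : c < 0
  · have h0 : c.toNat = 0 := by omega
    have hc1 : c < 1 := by omega
    simp [h0, hc1]
  by_cases hw : w ∈ m.take c.toNat
  · have hlen : ((m.take c.toNat).erase w).length = (m.take c.toNat).length - 1 :=
      List.length_erase_of_mem hw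
    have hpos : 0 < (m.take c.toNat).length := List.length_pos_of_mem hw
    have hle : (m.take c.toNat).length ≤ c.toNat := by
      simp [List.length_take]
    have hcond : ¬ c < ((w :: (m.take c.toNat).erase w).length : Int) := by
      simp only [List.length_cons, hlen]
      omega
    rw [if_neg hcond]
    have hn1 : 1 ≤ c.toNat := by omega
    rw [show c.toNat = (c.toNat - 1) + 1 from by omega, List.take_succ_cons]
    rw [show (c.toNat - 1) + 1 = c.toNat from by omega]
    rw [take_erase_mem m w c.toNat hw]
  · rw [List.erase_of_not_mem hw]
    by_cases hcond : c < ((w :: m.take c.toNat).length : Int)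
    · rw [if_pos hcond]
      have hge : c.toNat ≤ m.length := by
        simp only [List.length_cons, List.length_take] at hcond
        omega
      cases hn : c.toNat with
      | zero => simp
      | succ k =>
        rw [hn] at hw
        have hmin : min (k+1) m.length = k+1 := by omega
        rw [List.dropLast_eq_take]
        simp only [List.length_cons, List.length_take, hmin, Nat.add_sub_cancel]
        rw [List.take_succ_cons, List.take_succ_cons, List.take_take,
          take_erase_not_mem m w (k+1) k hw (by omega)]
        have hmk : min k (k+1) = k := by omega
        rw [hmk]
    · rw [if_neg hcond]
      have hmlt : m.length < c.toNat := by
        simp only [List.length_cons, List.length_take] at hcond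
        omega
      have hmeq : m.take c.toNat = m := List.take_of_length_le (le_of_lt hmlt)
      rw [hmeq] at hw ⊢
      rw [List.erase_of_not_mem hw, List.take_of_length_le (by simp; omega)]

-- A computes take capacity of the most-recent-first occurrence list
theorem A_char (c : Int) (ws : List String) :
    lru_words c ws = (fo ws.reverse).take c.toNat := by
  induction ws using List.reverseRecOn with
  | nil => simp [lru_words, fo]
  | append_singleton l a ih =>
    unfold lru_words at ih ⊢
    rw [List.foldl_append, List.foldl_cons, List.foldl_nil, ih,
      step_take c (fo l.reverse) a]
    simp [fo]

-- `seen.add w` filters like `seen` followed by discarding `w`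
theorem filter_add (seen : PySem.Set String) (w : String)
    (hw : PySem.Set.contains seen w = false) (r : List String) :
    r.filter (fun x => !(PySem.Set.contains (PySem.Set.add seen w) x)) =
      (r.filter (fun x => !(PySem.Set.contains seen x))).filter (fun x => x != w) := by
  rw [List.filter_filter]
  apply List.filter_congr
  intro x _
  have hadd : PySem.Set.add seen w = seen ++ [w] := by
    simp [PySem.Set.add, PySem.Set.contains] at hw ⊢
    simp [hw]
  rw [hadd]
  by_cases h1 : x ∈ seen <;> by_cases h2 : x = w <;>
    simp [PySem.Set.contains, List.contains_eq_mem, h1, h2]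

-- B's tail-recursive loop, characterised
theorem B_loop (c : Int) (rws : List String) : ∀ (seen : PySem.Set String) (out : List String),
    lruRev c rws seen out =
      out ++ ((fo (rws.filter (fun x => !(PySem.Set.contains seen x)))).take (c.toNat - out.length)) := by
  induction rws with
  | nil => intro seen out; simp [lruRev, fo]
  | cons w r ih =>
    intro seen out
    by_cases hc : c ≤ (out.length : Int)
    · rw [lruRev, if_pos hc]
      have h0 : c.toNat - out.length = 0 := by omega
      simp [h0]
    · rw [lruRev, if_neg hc]
      cases hw : PySem.Set.contains seen w with
      | true =>
        have hwmem : w ∈ seen := by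
          have h := hw
          simp [PySem.Set.contains, List.contains_eq_mem] at h
          exact h
        have hfilt : (w :: r).filter (fun x => !(PySem.Set.contains seen x)) =
            r.filter (fun x => !(PySem.Set.contains seen x)) := by
          simp [List.filter_cons, PySem.Set.contains, List.contains_eq_mem, hwmem]
        rw [if_pos rfl, ih seen out, hfilt]
      | false =>
        have hwmem : w ∉ seen := fun h => by
          simp [PySem.Set.contains, List.contains_eq_mem, h] at hw
        have hfilt : (w :: r).filter (fun x => !(PySem.Set.contains seen x)) =
            w :: r.filter (fun x => !(PySem.Set.contains seen x)) := by
          simp [List.filter_cons, PySem.Set.contains, List.contains_eq_mem, hwmem]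
        rw [if_neg Bool.false_ne_true, ih (PySem.Set.add seen w) (out ++ [w]),
          filter_add seen w hw r, fo_filter, hfilt]
        have hlen : (out ++ [w]).length = out.length + 1 := by simp
        rw [hlen]
        have hfo : fo (w :: r.filter (fun x => !(PySem.Set.contains seen x))) =
            w :: (fo (r.filter (fun x => !(PySem.Set.contains seen x)))).erase w := rfl
        rw [hfo,
          show c.toNat - out.length = (c.toNat - (out.length + 1)) + 1 from by omega,
          List.take_succ_cons]
        simp [List.append_assoc]

theorem B_char (c : Int) (ws : List String) :
    lru_words_alt c ws = (fo ws.reverse).take c.toNat := by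
  unfold lru_words_alt
  rw [B_loop]
  simp [PySem.Set.empty]

-- ===== VERDICT (by name: the statement is the Claim_ definition above) =====
theorem lru_words_spec : Claim_equal_lru_words := by
  intro c ws _
  unfold Spec_lru_words
  rw [A_char, B_char]
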